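-- pv_equiv track=rewrite | github.com/dStensland/LostCity | crawlers/sources/lovett_summer_programs.py | _school_level_age_range
-- ===== SOURCE A (Python) =====
-- from typing import Optional
--
-- SCHOOL_LEVEL_AGES = {
--     "Lower School": (5, 10),
--     "Middle School": (11, 13),
--     "Upper School": (14, 17),
--     "High School": (14, 17),
-- }
--
-- def _school_level_age_range(levels: list[str]) -> tuple[Optional[int], Optional[int]]:
--     mins: list[int] = []
--     maxes: list[int] = []
--     for level in levels:
--         age_range = SCHOOL_LEVEL_AGES.get(level)
--         if age_range:
--             mins.append(age_range[0])
--             maxes.append(age_range[1])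
--     if mins and maxes:
--         return min(mins), max(maxes)
--     return None, None
-- ===== SOURCE B (Python) =====
-- from typing import Optional
--
-- SCHOOL_LEVEL_AGES = {
--     "Lower School": (5, 10),
--     "Middle School": (11, 13),
--     "Upper School": (14, 17),
--     "High School": (14, 17),
-- }
--
-- def _school_level_age_range(levels: list[str]) -> tuple[Optional[int], Optional[int]]:
--     # Decision-table algorithm: the four school levels form fixed, ordered age
--     # bands (5-10 < 11-13 < 14-17), so the answer depends only on WHICH bands
--     # are present, never on how the matches are interleaved in `levels`.
--     present = set(levels)
--     has_lower = "Lower School" in present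
--     has_middle = "Middle School" in present
--     has_upper = "Upper School" in present or "High School" in present
--     if has_lower:
--         lo: Optional[int] = 5
--     elif has_middle:
--         lo = 11
--     elif has_upper:
--         lo = 14
--     else:
--         lo = None
--     if has_upper:
--         hi: Optional[int] = 17
--     elif has_middle:
--         hi = 13
--     elif has_lower:
--         hi = 10
--     else:
--         hi = None
--     return lo, hi
-- ===== Notes on version B (the rewrite author's own statement) =====
-- stated objective: alternative
-- what changed: B replaces the per-element lookup/collect/min-max reduction with a decision table: it builds a set of the levels once, tests membership of the four known level names, and reads the min/max straight off the fixed ordered age bands via two if/elif cascades (no min(), no max(), no per-element numeric work).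
import Mathlib
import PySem

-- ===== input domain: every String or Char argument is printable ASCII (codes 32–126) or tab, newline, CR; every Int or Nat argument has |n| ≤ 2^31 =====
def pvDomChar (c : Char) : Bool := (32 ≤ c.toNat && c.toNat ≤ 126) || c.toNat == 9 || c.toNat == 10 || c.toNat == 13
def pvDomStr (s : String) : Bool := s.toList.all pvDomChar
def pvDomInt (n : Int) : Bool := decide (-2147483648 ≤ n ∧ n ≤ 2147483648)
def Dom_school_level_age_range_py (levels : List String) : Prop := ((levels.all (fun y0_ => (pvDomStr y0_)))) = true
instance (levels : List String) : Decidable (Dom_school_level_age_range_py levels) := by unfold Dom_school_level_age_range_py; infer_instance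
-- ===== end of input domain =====

-- B replaces A's collect-then-min/max loop with a decision table: membership tests of the four
-- fixed level names against a set of the input, then the bounds read off the ordered age bands;
-- objective: alternative (different algorithm, similar cost).


-- ===== PORT A =====
def SCHOOL_LEVEL_AGES : PySem.Dict String (Int × Int) :=
  PySem.Dict.ofList [("Lower School", (5, 10)), ("Middle School", (11, 13)),
                     ("Upper School", (14, 17)), ("High School", (14, 17))]

-- A's loop: append to the two lists when the lookup succeeds (a found tuple is always truthy)
def slarLoopA : List String → List Int → List Int → List Int × List Int
  | [], mins, maxes => (mins, maxes)
  | level :: rest, mins, maxes =>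
    match SCHOOL_LEVEL_AGES.get? level with
    | some age_range => slarLoopA rest (mins ++ [age_range.1]) (maxes ++ [age_range.2])
    | none => slarLoopA rest mins maxes

def school_level_age_range_py (levels : List String) : Option Int × Option Int :=
  let p := slarLoopA levels [] []
  if p.1 ≠ [] ∧ p.2 ≠ [] then
    (PySem.List.min? p.1 (fun y => y), PySem.List.max? p.2 (fun y => y))
  else (none, none)

-- ===== PORT B =====
def school_level_age_range_py_alt (levels : List String) : Option Int × Option Int :=
  let present := PySem.Set.ofList levels
  let has_lower := present.contains "Lower School"
  let has_middle := present.contains "Middle School"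
  let has_upper := present.contains "Upper School" || present.contains "High School"
  let lo : Option Int :=
    if has_lower then some 5 else if has_middle then some 11
    else if has_upper then some 14 else none
  let hi : Option Int :=
    if has_upper then some 17 else if has_middle then some 13
    else if has_lower then some 10 else none
  (lo, hi)

-- ===== PRECONDITION & SPEC =====
def Spec_school_level_age_range_py (levels : List String) (out : Option Int × Option Int) : Prop := out = school_level_age_range_py_alt levels
instance (levels : List String) (out : Option Int × Option Int) : Decidable (Spec_school_level_age_range_py levels out) := by unfold Spec_school_level_age_range_py; infer_instance

-- ===== CLAIM =====
def Claim_equal_school_level_age_range_py : Prop := ∀ (levels : List String), Dom_school_level_age_range_py levels → Spec_school_level_age_range_py levels (school_level_age_range_py levels)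

-- ===== LEMMAS AND PROOFS =====

-- A's streamed state: one step of A's loop as an accumulator update (proof-only helper).
def slarStepB (acc : Option Int × Option Int) (level : String) : Option Int × Option Int :=
  match SCHOOL_LEVEL_AGES.get? level with
  | some (lo, hi) =>
    (some (match acc.1 with | none => lo | some m => min m lo),
     some (match acc.2 with | none => hi | some m => max m hi))
  | none => acc

theorem slar_min_nil : PySem.List.min? ([] : List Int) (fun y => y) = none :=
  Iff.mpr (PySem.List.min?_eq_none_iff _ _) rfl

theorem slar_max_nil : PySem.List.max? ([] : List Int) (fun y => y) = none :=
  Iff.mpr (PySem.List.max?_eq_none_iff _ _) rfl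

theorem slar_min_snoc (xs : List Int) (x : Int) :
    PySem.List.min? (xs ++ [x]) (fun y => y)
      = some (match PySem.List.min? xs (fun y => y) with | none => x | some m => min m x) := by
  cases xs with
  | nil => simp [slar_min_nil, PySem.List.min?_id_cons]
  | cons h t =>
    rw [List.cons_append, PySem.List.min?_id_cons, PySem.List.min?_id_cons]
    simp [List.foldl_append]

theorem slar_max_snoc (xs : List Int) (x : Int) :
    PySem.List.max? (xs ++ [x]) (fun y => y)
      = some (match PySem.List.max? xs (fun y => y) with | none => x | some m => max m x) := by
  cases xs with
  | nil => simp [slar_max_nil, PySem.List.max?_id_cons]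
  | cons h t =>
    rw [List.cons_append, PySem.List.max?_id_cons, PySem.List.max?_id_cons]
    simp [List.foldl_append]

-- A's finish step applied to the loop state equals the streamed fold from the state's extrema.
theorem slar_inv (levels : List String) :
    ∀ (mins maxes : List Int), (mins = [] ↔ maxes = []) →
      (let p := slarLoopA levels mins maxes;
       if p.1 ≠ [] ∧ p.2 ≠ [] then
         (PySem.List.min? p.1 (fun y => y), PySem.List.max? p.2 (fun y => y))
       else (none, none))
        = levels.foldl slarStepB
            (PySem.List.min? mins (fun y => y), PySem.List.max? maxes (fun y => y)) := by
  induction levels with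
  | nil =>
    intro mins maxes hiff
    by_cases hm : mins = []
    · have hx : maxes = [] := hiff.mp hm
      subst hm hx
      simp [slarLoopA, slar_min_nil, slar_max_nil]
    · have hx : maxes ≠ [] := fun h => hm (hiff.mpr h)
      simp [slarLoopA, hm, hx]
  | cons level rest ih =>
    intro mins maxes hiff
    show (let p := slarLoopA (level :: rest) mins maxes; _) = _
    rw [List.foldl_cons]
    cases hg : SCHOOL_LEVEL_AGES.get? level with
    | none =>
      have : slarLoopA (level :: rest) mins maxes = slarLoopA rest mins maxes := by
        simp [slarLoopA, hg]
      rw [this, ih mins maxes hiff]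
      simp [slarStepB, hg]
    | some r =>
      have : slarLoopA (level :: rest) mins maxes
          = slarLoopA rest (mins ++ [r.1]) (maxes ++ [r.2]) := by
        simp [slarLoopA, hg]
      rw [this, ih (mins ++ [r.1]) (maxes ++ [r.2]) (by simp)]
      congr 1
      simp only [slarStepB, hg, slar_min_snoc, slar_max_snoc]

-- Cascade forms of B's two bounds, phrased over plain list membership.
def cLo (levels : List String) : Option Int :=
  if "Lower School" ∈ levels then some 5 else if "Middle School" ∈ levels then some 11
  else if "Upper School" ∈ levels ∨ "High School" ∈ levels then some 14 else none

def cHi (levels : List String) : Option Int :=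
  if "Upper School" ∈ levels ∨ "High School" ∈ levels then some 17
  else if "Middle School" ∈ levels then some 13
  else if "Lower School" ∈ levels then some 10 else none

-- merge of an accumulator with the reduction of the remaining suffix
def mergeMin : Option Int → Option Int → Option Int
  | a, none => a
  | none, some x => some x
  | some m, some x => some (min m x)

def mergeMax : Option Int → Option Int → Option Int
  | a, none => a
  | none, some x => some x
  | some m, some x => some (max m x)

theorem slar_alt_eq (levels : List String) :
    school_level_age_range_py_alt levels = (cLo levels, cHi levels) := by
  simp [school_level_age_range_py_alt, cLo, cHi, PySem.Set.contains,
        PySem.Set.mem_ofList, or_comm]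

theorem slar_step_merge (acc : Option Int × Option Int) (l : String) :
    slarStepB acc l
      = (mergeMin acc.1 ((SCHOOL_LEVEL_AGES.get? l).map Prod.fst),
         mergeMax acc.2 ((SCHOOL_LEVEL_AGES.get? l).map Prod.snd)) := by
  cases hg : SCHOOL_LEVEL_AGES.get? l with
  | none => simp [slarStepB, hg, mergeMin, mergeMax]
  | some r =>
    cases r
    cases h1 : acc.1 <;> cases h2 : acc.2 <;>
      simp [slarStepB, hg, mergeMin, mergeMax, h1, h2]

theorem mergeMin_none_left (x : Option Int) : mergeMin none x = x := by
  cases x <;> rfl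

theorem mergeMax_none_left (x : Option Int) : mergeMax none x = x := by
  cases x <;> rfl

theorem mergeMin_none_right (a : Option Int) : mergeMin a none = a := rfl

theorem mergeMax_none_right (a : Option Int) : mergeMax a none = a := rfl

theorem slar_get?_none (l : String) (h1 : ¬ l = "Lower School") (h2 : ¬ l = "Middle School")
    (h3 : ¬ l = "Upper School") (h4 : ¬ l = "High School") :
    SCHOOL_LEVEL_AGES.get? l = none := by
  have e : SCHOOL_LEVEL_AGES
      = PySem.Dict.mk [("Lower School", (5, 10)), ("Middle School", (11, 13)),
                       ("Upper School", (14, 17)), ("High School", (14, 17))] := rfl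
  rw [e]
  simp [beq_iff_eq, Ne.symm h1, Ne.symm h2, Ne.symm h3, Ne.symm h4, PySem.Dict.get?]

theorem cLo_cons (l : String) (rest : List String) :
    cLo (l :: rest) = mergeMin ((SCHOOL_LEVEL_AGES.get? l).map Prod.fst) (cLo rest) := by
  by_cases h1 : l = "Lower School"
  · subst h1
    show cLo ("Lower School" :: rest) = mergeMin (some 5) (cLo rest)
    unfold cLo
    simp only [List.mem_cons]
    split_ifs <;> first | decide | simp_all
  · by_cases h2 : l = "Middle School"
    · subst h2
      show cLo ("Middle School" :: rest) = mergeMin (some 11) (cLo rest)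
      unfold cLo
      simp only [List.mem_cons]
      split_ifs <;> first | decide | simp_all
    · by_cases h3 : l = "Upper School"
      · subst h3
        show cLo ("Upper School" :: rest) = mergeMin (some 14) (cLo rest)
        unfold cLo
        simp only [List.mem_cons]
        split_ifs <;> first | decide | simp_all
      · by_cases h4 : l = "High School"
        · subst h4
          show cLo ("High School" :: rest) = mergeMin (some 14) (cLo rest)
          unfold cLo
          simp only [List.mem_cons]
          split_ifs <;> first | decide | simp_all
        · rw [slar_get?_none l h1 h2 h3 h4, Option.map_none, mergeMin_none_left]
          unfold cLo
          simp [List.mem_cons, Ne.symm h1, Ne.symm h2, Ne.symm h3, Ne.symm h4]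

theorem cHi_cons (l : String) (rest : List String) :
    cHi (l :: rest) = mergeMax ((SCHOOL_LEVEL_AGES.get? l).map Prod.snd) (cHi rest) := by
  by_cases h1 : l = "Lower School"
  · subst h1
    show cHi ("Lower School" :: rest) = mergeMax (some 10) (cHi rest)
    unfold cHi
    simp only [List.mem_cons]
    split_ifs <;> first | decide | simp_all
  · by_cases h2 : l = "Middle School"
    · subst h2
      show cHi ("Middle School" :: rest) = mergeMax (some 13) (cHi rest)
      unfold cHi
      simp only [List.mem_cons]
      split_ifs <;> first | decide | simp_all
    · by_cases h3 : l = "Upper School"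
      · subst h3
        show cHi ("Upper School" :: rest) = mergeMax (some 17) (cHi rest)
        unfold cHi
        simp only [List.mem_cons]
        split_ifs <;> first | decide | simp_all
      · by_cases h4 : l = "High School"
        · subst h4
          show cHi ("High School" :: rest) = mergeMax (some 17) (cHi rest)
          unfold cHi
          simp only [List.mem_cons]
          split_ifs <;> first | decide | simp_all
        · rw [slar_get?_none l h1 h2 h3 h4, Option.map_none, mergeMax_none_left]
          unfold cHi
          simp [List.mem_cons, Ne.symm h1, Ne.symm h2, Ne.symm h3, Ne.symm h4]

theorem mergeMin_assoc (a b c : Option Int) :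
    mergeMin (mergeMin a b) c = mergeMin a (mergeMin b c) := by
  cases a <;> cases b <;> cases c <;> simp [mergeMin, min_assoc]

theorem mergeMax_assoc (a b c : Option Int) :
    mergeMax (mergeMax a b) c = mergeMax a (mergeMax b c) := by
  cases a <;> cases b <;> cases c <;> simp [mergeMax, max_assoc]

theorem slar_fold_cascade (levels : List String) :
    ∀ (acc : Option Int × Option Int),
      levels.foldl slarStepB acc
        = (mergeMin acc.1 (cLo levels), mergeMax acc.2 (cHi levels)) := by
  induction levels with
  | nil =>
    intro acc
    have hLo : cLo [] = none := rfl
    have hHi : cHi [] = none := rfl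
    simp [hLo, hHi, mergeMin_none_right, mergeMax_none_right]
  | cons l rest ih =>
    intro acc
    rw [List.foldl_cons, ih, slar_step_merge, cLo_cons, cHi_cons]
    simp [mergeMin_assoc, mergeMax_assoc]

-- ===== VERDICT =====
theorem school_level_age_range_py_spec : Claim_equal_school_level_age_range_py := by
  intro levels _
  unfold Spec_school_level_age_range_py school_level_age_range_py
  have h := slar_inv levels [] [] Iff.rfl
  rw [slar_alt_eq]
  simp only [slar_min_nil, slar_max_nil] at h
  rw [h, slar_fold_cascade]
  cases hLo : cLo levels <;> cases hHi : cHi levels <;> simp [mergeMin, mergeMax]
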